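-- pv_equiv track=rewrite | github.com/rajlath/rkl_codes | codility/equileader.py | solution
-- ===== SOURCE A (Python) =====
-- def solution(A):
--     lens = len(A)
--     maybe = -1
--     maybe_cnt = 0
--     maybe_idx = -1
--     for i in range(lens):
--         if maybe_cnt == 0:
--             maybe = A[i]
--             maybe_cnt += 1
--             maybe_idx = i
--         else:
--             if A[i] == maybe:
--                 maybe_cnt += 1
--             else:
--                 maybe_cnt -= 1
--     if A.count(maybe) <= lens//2:return 0
--     else:
--         leader = maybe
--     total_leaders = sum([1 for x in A if x == leader] )
--     leaders_till_now = 0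
--     equileader = 0
--     for i in range(len(A)):
--         if A[i] == leader:leaders_till_now += 1
--         if leaders_till_now > (i+1)//2 and total_leaders - leaders_till_now >= (len(A) - i + 1 )//2:
--             equileader += 1
--     return equileader
-- ===== SOURCE B (Python) =====
-- def solution(A):
--     n = len(A)
--     freq = {}
--     for x in A:
--         freq[x] = freq.get(x, 0) + 1
--     leader = 0
--     total = 0
--     for x, c in freq.items():
--         if c > total:
--             leader = x
--             total = c
--     if total <= n // 2:
--         return 0
--     equileader = 0
--     seen = 0
--     for i, x in enumerate(A):
--         if x == leader:
--             seen += 1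
--         if 2 * seen >= i + 2 and 2 * (total - seen) >= n - i:
--             equileader += 1
--     return equileader
-- ===== Notes on version B (the rewrite author's own statement) =====
-- stated objective: simpler
-- what changed: Replaces A's Boyer-Moore voting pass plus its two separate recount passes (A.count and a sum over a filtered list) with a single frequency dictionary and an argmax scan over its items, and states the split conditions by plain inequalities instead of floor division.
import Mathlib
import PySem

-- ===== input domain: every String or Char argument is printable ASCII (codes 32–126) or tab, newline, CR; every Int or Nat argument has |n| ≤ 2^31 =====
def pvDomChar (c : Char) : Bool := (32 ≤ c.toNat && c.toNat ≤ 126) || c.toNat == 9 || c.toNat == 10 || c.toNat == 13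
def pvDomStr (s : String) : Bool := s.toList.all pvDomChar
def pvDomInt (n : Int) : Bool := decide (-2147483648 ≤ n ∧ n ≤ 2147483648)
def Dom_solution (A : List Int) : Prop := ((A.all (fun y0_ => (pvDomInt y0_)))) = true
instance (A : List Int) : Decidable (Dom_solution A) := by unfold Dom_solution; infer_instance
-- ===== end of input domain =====

-- B replaces A's Boyer–Moore voting pass (plus the two recount passes) with one frequency
-- dictionary and an argmax scan over its items, and states the split conditions without
-- floor division; objective: simpler.

-- ===== PORT A =====
def solution (A : List Int) : Int :=
  let lens : Int := (A.length : Int)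
  -- for i in range(lens): Boyer–Moore voting with state (maybe, maybe_cnt, maybe_idx)
  let st := (PySem.List.enumerate A).foldl
    (fun (st : Int × Int × Int) xi =>
      if st.2.1 = 0 then (xi.2, st.2.1 + 1, xi.1)
      else if xi.2 = st.1 then (st.1, st.2.1 + 1, st.2.2)
      else (st.1, st.2.1 - 1, st.2.2))
    (-1, 0, -1)
  let maybe := st.1
  if (PySem.List.count A maybe : Int) ≤ PySem.Int.floordiv lens 2 then 0
  else
    let leader := maybe
    let total_leaders : Int := ((A.filter (fun x => x == leader)).map (fun _ => (1 : Int))).sum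
    let st2 := (PySem.List.enumerate A).foldl
      (fun (st : Int × Int) xi =>
        let ltn := if xi.2 = leader then st.1 + 1 else st.1
        (ltn,
         if PySem.Int.floordiv (xi.1 + 1) 2 < ltn ∧
            PySem.Int.floordiv (lens - xi.1 + 1) 2 ≤ total_leaders - ltn
         then st.2 + 1 else st.2))
      (0, 0)
    st2.2

-- ===== PORT B =====
def solution_alt (A : List Int) : Int :=
  let n : Int := (A.length : Int)
  -- freq[x] = freq.get(x, 0) + 1
  let freq := A.foldl (fun (d : PySem.Dict Int Int) x => d.insert x (d.getD x 0 + 1)) PySem.Dict.empty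
  -- argmax over freq.items()
  let lt := freq.items.foldl (fun (lt : Int × Int) xc => if lt.2 < xc.2 then xc else lt) (0, 0)
  let leader := lt.1
  let total := lt.2
  if total ≤ PySem.Int.floordiv n 2 then 0
  else
    let st := (PySem.List.enumerate A).foldl
      (fun (st : Int × Int) xi =>
        let seen := if xi.2 = leader then st.1 + 1 else st.1
        (seen, if xi.1 + 2 ≤ 2 * seen ∧ n - xi.1 ≤ 2 * (total - seen) then st.2 + 1 else st.2))
      (0, 0)
    st.2

-- ===== PRECONDITION & SPEC =====
def Spec_solution (A : List Int) (out : Int) : Prop := out = solution_alt A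
instance (A : List Int) (out : Int) : Decidable (Spec_solution A out) := by unfold Spec_solution; infer_instance

-- ===== CLAIM (what is proved, stated in full; the proofs are below) =====
def Claim_equal_solution : Prop := ∀ (A : List Int), Dom_solution A → Spec_solution A (solution A)

-- ===== LEMMAS AND PROOFS =====

-- pair-state Boyer–Moore step (the index component of A's state is dead)
def bmStep (st : Int × Int) (x : Int) : Int × Int :=
  if st.2 = 0 then (x, st.2 + 1)
  else if x = st.1 then (st.1, st.2 + 1)
  else (st.1, st.2 - 1)

theorem bm_proj (l : List Int) : ∀ (s : Int) (st : Int × Int × Int),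
    (((PySem.List.enumerate l s).foldl
      (fun (st : Int × Int × Int) xi =>
        if st.2.1 = 0 then (xi.2, st.2.1 + 1, xi.1)
        else if xi.2 = st.1 then (st.1, st.2.1 + 1, st.2.2)
        else (st.1, st.2.1 - 1, st.2.2)) st).1,
     ((PySem.List.enumerate l s).foldl
      (fun (st : Int × Int × Int) xi =>
        if st.2.1 = 0 then (xi.2, st.2.1 + 1, xi.1)
        else if xi.2 = st.1 then (st.1, st.2.1 + 1, st.2.2)
        else (st.1, st.2.1 - 1, st.2.2)) st).2.1)
    = l.foldl bmStep (st.1, st.2.1) := by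
  induction l with
  | nil => intro s st; simp [PySem.List.enumerate]
  | cons x xs ih =>
      intro s st
      rw [PySem.List.enumerate_cons]
      simp only [List.foldl_cons]
      rw [ih]
      congr 1
      obtain ⟨mb, c, idx⟩ := st
      by_cases h : c = 0 <;> simp [bmStep, h] <;> by_cases h2 : x = mb <;> simp [h2]

-- Boyer–Moore correctness: any strict-majority element wins the vote
theorem bm_majority (l : List Int) : ∀ (st : Int × Int) (m : Int), 0 ≤ st.2 →
    (l.length : Int) < 2 * (l.count m : Int) + (if m = st.1 then st.2 else -st.2) →
    (l.foldl bmStep st).1 = m := by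
  induction l with
  | nil =>
      intro st m h0 hm
      simp only [List.count_nil, List.length_nil] at hm
      by_cases h : m = st.1
      · simpa [h] using rfl
      · simp [h] at hm; omega
  | cons x xs ih =>
      intro st m h0 hm
      obtain ⟨mb, c⟩ := st
      simp only [List.count_cons, List.length_cons] at hm
      push_cast [apply_ite (Nat.cast : Nat → Int), beq_iff_eq] at hm
      simp only [List.foldl_cons]
      by_cases hc : c = 0
      · refine ih _ m (by simp [bmStep, hc]) ?_
        simp only [bmStep, hc, if_pos]
        by_cases hx : m = x <;> by_cases hmb : m = mb <;> simp only [hx, hmb, if_pos, if_neg, reduceIte] at hm ⊢ <;> simp_all <;> omega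
      · by_cases hx : x = mb
        · refine ih _ m (by simp [bmStep, hc, hx]; omega) ?_
          simp only [bmStep, if_neg hc, hx, if_pos]
          by_cases hmb : m = mb <;> simp_all <;> omega
        · refine ih _ m (by simp [bmStep, hc, hx]; omega) ?_
          simp only [bmStep, if_neg hc, if_neg hx]
          by_cases hmb : m = mb <;> by_cases hmx : m = x <;> simp_all <;> omega

-- argmax fold: the result bounds every scanned value and is either the seed or a scanned pair
theorem argmax_fold (l : List (Int × Int)) : ∀ (acc : Int × Int),
    acc.2 ≤ (l.foldl (fun lt xc => if lt.2 < xc.2 then xc else lt) acc).2 ∧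
    (∀ p ∈ l, p.2 ≤ (l.foldl (fun lt xc => if lt.2 < xc.2 then xc else lt) acc).2) ∧
    ((l.foldl (fun lt xc => if lt.2 < xc.2 then xc else lt) acc) = acc ∨
     (l.foldl (fun lt xc => if lt.2 < xc.2 then xc else lt) acc) ∈ l) := by
  induction l with
  | nil => intro acc; simp
  | cons q l ih =>
      intro acc
      simp only [List.foldl_cons]
      obtain ⟨h1, h2, h3⟩ := ih (if acc.2 < q.2 then q else acc)
      refine ⟨le_trans (by split <;> omega) h1, ?_, ?_⟩
      · intro p hp
        rcases List.mem_cons.1 hp with rfl | hp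
        · exact le_trans (by split <;> omega) h1
        · exact h2 p hp
      · rcases h3 with h3 | h3
        · rw [h3]; split
          · exact Or.inr (List.mem_cons_self)
          · exact Or.inl rfl
        · exact Or.inr (List.mem_cons_of_mem _ h3)

-- two distinct values cannot each occur in more than half the list
theorem count_add_count_le (l : List Int) (a b : Int) (hab : a ≠ b) :
    l.count a + l.count b ≤ l.length := by
  induction l with
  | nil => simp
  | cons x xs ih =>
      simp only [List.count_cons, List.length_cons, beq_iff_eq]
      split_ifs with h1 h2 <;> omega

-- floor-division-by-2 bracket lemmas
theorem fd2_lt (a q : Int) : PySem.Int.floordiv a 2 < q ↔ a < q * 2 :=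
  PySem.Int.floordiv_lt_iff_lt_mul (by norm_num)

theorem fd2_le (a q : Int) : PySem.Int.floordiv a 2 ≤ q ↔ a < (q + 1) * 2 := by
  rw [← not_lt, Int.lt_iff_add_one_le, PySem.Int.le_floordiv_iff_mul_le (by norm_num), not_le]

theorem sum_ones (A : List Int) (m : Int) :
    ((A.filter (fun x => x == m)).map (fun _ => (1 : Int))).sum = (List.count m A : Int) := by
  rw [PySem.List.sum_map_const_int, List.count_eq_countP, ← List.countP_eq_length_filter]
  simp

-- the common second pass, with the leader and its total count plugged in
def loopSpec (A : List Int) (m : Int) : Int :=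
  ((PySem.List.enumerate A).foldl
    (fun (st : Int × Int) (xi : Int × Int) =>
      ((if xi.2 = m then st.1 + 1 else st.1),
       if xi.1 + 2 ≤ 2 * (if xi.2 = m then st.1 + 1 else st.1) ∧
          (A.length : Int) - xi.1 ≤ 2 * ((List.count m A : Int) - (if xi.2 = m then st.1 + 1 else st.1))
       then st.2 + 1 else st.2))
    (0, 0)).2

theorem solA_maj (A : List Int) (m : Int)
    (hm : (A.length : Int) < 2 * (List.count m A : Int)) : solution A = loopSpec A m := by
  simp only [solution]
  have hFm : (List.foldl
      (fun (st : Int × Int × Int) (xi : Int × Int) =>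
        if st.2.1 = 0 then (xi.2, st.2.1 + 1, xi.1)
        else if xi.2 = st.1 then (st.1, st.2.1 + 1, st.2.2)
        else (st.1, st.2.1 - 1, st.2.2))
      (-1, 0, -1) (PySem.List.enumerate A)).1 = m := by
    have h := congrArg Prod.fst (bm_proj A 0 (-1, 0, -1))
    simp only at h
    rw [h]
    exact bm_majority A (-1, 0) m (by norm_num) (by simpa using hm)
  simp only [hFm, PySem.List.count_eq, sum_ones]
  rw [if_neg (not_le.2 ((fd2_lt _ _).2 (by omega)))]
  simp only [loopSpec]
  congr 1
  congr 1
  funext st xi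
  have h1 : PySem.Int.floordiv (xi.1 + 1) 2 < (if xi.2 = m then st.1 + 1 else st.1) ↔
      xi.1 + 2 ≤ 2 * (if xi.2 = m then st.1 + 1 else st.1) := by rw [fd2_lt]; omega
  have h2 : PySem.Int.floordiv ((A.length : Int) - xi.1 + 1) 2 ≤
        (List.count m A : Int) - (if xi.2 = m then st.1 + 1 else st.1) ↔
      (A.length : Int) - xi.1 ≤ 2 * ((List.count m A : Int) - (if xi.2 = m then st.1 + 1 else st.1)) := by
    rw [fd2_le]; omega
  simp only [h1, h2]

theorem solB_maj (A : List Int) (m : Int)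
    (hm : (A.length : Int) < 2 * (List.count m A : Int)) : solution_alt A = loopSpec A m := by
  simp only [solution_alt]
  rw [PySem.Dict.foldl_insert_getD_add_one_eq_counter, PySem.Dict.items_counter]
  obtain ⟨h1, h2, h3⟩ :=
    argmax_fold (List.map (fun k => (k, (List.count k A : Int))) (PySem.Set.ofList A)) (0, 0)
  have hcntpos : 0 < List.count m A := by
    have hl : (0 : Int) ≤ (A.length : Int) := Int.natCast_nonneg _
    omega
  have hmemA : m ∈ A := List.count_pos_iff.1 hcntpos
  have hmmem : (m, (List.count m A : Int)) ∈
      List.map (fun k => (k, (List.count k A : Int))) (PySem.Set.ofList A) :=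
    List.mem_map_of_mem ((PySem.Set.mem_ofList A m).2 hmemA)
  have hbound := h2 _ hmmem
  rcases h3 with h0 | hmem
  · exfalso
    rw [h0] at hbound
    simp only at hbound
    omega
  · obtain ⟨k, hk, hkeq⟩ := List.mem_map.1 hmem
    have hL := congrArg Prod.fst hkeq
    have hT := congrArg Prod.snd hkeq
    simp only at hL hT
    have hkm : k = m := by
      by_contra hne
      have hcc := count_add_count_le A k m hne
      rw [← hT] at hbound
      omega
    subst hkm
    simp only [← hL, ← hT]
    rw [if_neg (not_le.2 ((fd2_lt _ _).2 (by omega)))]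
    simp only [loopSpec]

theorem solA_no (A : List Int)
    (h : ∀ m : Int, 2 * (List.count m A : Int) ≤ (A.length : Int)) : solution A = 0 := by
  simp only [solution, PySem.List.count_eq]
  rw [if_pos (by rw [← not_lt, fd2_lt, not_lt, mul_comm]; exact h _)]

theorem solB_no (A : List Int)
    (h : ∀ m : Int, 2 * (List.count m A : Int) ≤ (A.length : Int)) : solution_alt A = 0 := by
  simp only [solution_alt]
  rw [PySem.Dict.foldl_insert_getD_add_one_eq_counter, PySem.Dict.items_counter]
  obtain ⟨h1, h2, h3⟩ :=
    argmax_fold (List.map (fun k => (k, (List.count k A : Int))) (PySem.Set.ofList A)) (0, 0)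
  rw [if_pos]
  rw [← not_lt, fd2_lt, not_lt]
  rcases h3 with h0 | hmem
  · rw [h0]
    simpa using Int.natCast_nonneg A.length
  · obtain ⟨k, hk, hkeq⟩ := List.mem_map.1 hmem
    have hT := congrArg Prod.snd hkeq
    simp only at hT
    rw [← hT]
    have := h k
    omega

theorem main_eq (A : List Int) : solution A = solution_alt A := by
  by_cases hM : ∃ m : Int, (A.length : Int) < 2 * (List.count m A : Int)
  · obtain ⟨m, hm⟩ := hM
    rw [solA_maj A m hm, solB_maj A m hm]
  · rw [not_exists] at hM
    rw [solA_no A (fun m => by have := not_lt.1 (hM m); omega), solB_no A (fun m => by have := not_lt.1 (hM m); omega)]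

-- ===== VERDICT (by name: the statement is the Claim_ definition above) =====
theorem solution_spec : Claim_equal_solution := by
  intro A _
  unfold Spec_solution
  exact main_eq A
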